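-- pv_equiv track=rewrite | github.com/agerasev/llvm-opencl | test/misc.py | distribute_patterns
-- ===== SOURCE A (Python) =====
-- def distribute_patterns(names, patterns):
--     if not patterns or [] in patterns:
--         return [(n, []) for n in names]
--
--     for p in patterns:
--         if not any([p[0] in n for n in names]):
--             raise Exception("No match for pattern '{}'".format(".".join(p)))
--
--     matches = []
--     for n in names:
--         ps = [p[1:] for p in patterns if p[0] in n]
--
--         if len(ps) > 0:
--             matches.append((n, ps))
--
--     return matches
-- ===== SOURCE B (Python) =====
-- def distribute_patterns(names, patterns):
--     if not patterns or [] in patterns: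
--         return [(n, []) for n in names]
--
--     matched = set()
--     matches = []
--     for n in names:
--         ps = []
--         for i, p in enumerate(patterns):
--             if p[0] in n:
--                 matched.add(i)
--                 ps.append(p[1:])
--         if ps:
--             matches.append((n, ps))
--
--     for i, p in enumerate(patterns):
--         if i not in matched:
--             raise Exception("No match for pattern '{}'".format(".".join(p)))
--
--     return matches
-- ===== Notes on version B (the rewrite author's own statement) =====
-- stated objective: alternative
-- what changed: Replaces A's separate validation pass (nested any() over all names per pattern) with a single build pass over names that records matched pattern indices into a set, followed by one membership scan over patterns to raise on the first unmatched one.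
import Mathlib
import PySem

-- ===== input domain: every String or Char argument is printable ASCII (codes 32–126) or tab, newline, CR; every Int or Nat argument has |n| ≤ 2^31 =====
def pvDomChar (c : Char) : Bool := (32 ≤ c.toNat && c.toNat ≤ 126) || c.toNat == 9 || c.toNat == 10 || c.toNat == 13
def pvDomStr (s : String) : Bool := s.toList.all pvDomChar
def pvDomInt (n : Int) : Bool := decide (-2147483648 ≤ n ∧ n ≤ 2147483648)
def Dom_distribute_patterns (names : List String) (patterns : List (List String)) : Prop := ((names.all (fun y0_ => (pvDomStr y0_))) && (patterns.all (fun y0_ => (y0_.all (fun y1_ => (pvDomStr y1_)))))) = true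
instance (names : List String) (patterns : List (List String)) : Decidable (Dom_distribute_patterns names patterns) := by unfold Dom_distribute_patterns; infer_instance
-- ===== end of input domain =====

-- B replaces A's separate nested-any() validation pass with a single build pass over names
-- that records matched pattern indices in a set, then one membership scan over patterns:
-- an alternative decomposition (return value proved equal on Pre_; both raise the same
-- exception outside it, modelled by the unreached [] branch).

-- ===== PORT A =====
-- p[0] is ported as p.headD "": the guard '[] ∈ patterns' makes p ≠ [] in every use.
def distribute_patterns (names : List String) (patterns : List (List String)) : List (String × List (List String)) :=
  if patterns = [] ∨ [] ∈ patterns then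
    names.map (fun n => (n, ([] : List (List String))))
  else if patterns.all (fun p => names.any (fun n => PySem.Str.isIn (p.headD "") n)) then
    names.foldl (fun out n =>
      let ps := (patterns.filter (fun p => PySem.Str.isIn (p.headD "") n)).map
        (fun p => PySem.List.slice p (some 1) none)
      if ps.length > 0 then out ++ [(n, ps)] else out) []
  else []  -- Python raises Exception here: excluded by Pre_distribute_patterns

-- ===== PORT B =====
-- inner loop: for i, p in enumerate(patterns): if p[0] in n: matched.add(i); ps.append(p[1:])
def pvBInner (n : String) (acc : PySem.Set Int × List (List String)) (ip : Int × List String) :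
    PySem.Set Int × List (List String) :=
  if PySem.Str.isIn (ip.2.headD "") n then
    (PySem.Set.add acc.1 ip.1, acc.2 ++ [PySem.List.slice ip.2 (some 1) none])
  else acc

-- outer loop body: one name
def pvBStep (patterns : List (List String))
    (acc : PySem.Set Int × List (String × List (List String))) (n : String) :
    PySem.Set Int × List (String × List (List String)) :=
  let r := (PySem.List.enumerate patterns 0).foldl (pvBInner n) (acc.1, [])
  (r.1, if r.2 ≠ [] then acc.2 ++ [(n, r.2)] else acc.2)

def distribute_patterns_alt (names : List String) (patterns : List (List String)) : List (String × List (List String)) :=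
  if patterns = [] ∨ [] ∈ patterns then
    names.map (fun n => (n, ([] : List (List String))))
  else
    let r := names.foldl (pvBStep patterns) (PySem.Set.empty, [])
    if (PySem.List.enumerate patterns 0).all (fun ip => PySem.Set.contains r.1 ip.1) then r.2
    else []  -- Python raises Exception here: excluded by Pre_distribute_patterns

-- ===== PRECONDITION & SPEC =====
-- Pre_ excludes exactly the inputs where A raises: some pattern (when patterns is non-empty
-- with no empty pattern) whose head is a substring of no name. B raises the same Exception there.
def Pre_distribute_patterns (names : List String) (patterns : List (List String)) : Prop :=
  patterns = [] ∨ [] ∈ patterns ∨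
    ∀ p ∈ patterns, ∃ n ∈ names, PySem.Str.isIn (p.headD "") n = true
instance (names : List String) (patterns : List (List String)) : Decidable (Pre_distribute_patterns names patterns) := by unfold Pre_distribute_patterns; infer_instance

def pvWitness_distribute_patterns : List String × List (List String) :=
  (["ab", "c"], [["a", "x"], ["c"]])

def Spec_distribute_patterns (names : List String) (patterns : List (List String)) (out : List (String × List (List String))) : Prop := out = distribute_patterns_alt names patterns
instance (names : List String) (patterns : List (List String)) (out : List (String × List (List String))) : Decidable (Spec_distribute_patterns names patterns out) := by unfold Spec_distribute_patterns; infer_instance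

-- ===== CLAIM (what is proved, stated in full; the proofs are below) =====
def Claim_equal_distribute_patterns : Prop := ∀ (names : List String) (patterns : List (List String)), Dom_distribute_patterns names patterns → Pre_distribute_patterns names patterns → Spec_distribute_patterns names patterns (distribute_patterns names patterns)

-- ===== LEMMAS AND PROOFS =====

-- ps component of the inner fold = filter-then-map over the enumerated patterns
theorem pvBInner_snd (n : String) (l : List (Int × List String))
    (m : PySem.Set Int) (ps0 : List (List String)) :
    (l.foldl (pvBInner n) (m, ps0)).2 =
      ps0 ++ (l.filter (fun ip => PySem.Str.isIn (ip.2.headD "") n)).map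
        (fun ip => PySem.List.slice ip.2 (some 1) none) := by
  induction l generalizing m ps0 with
  | nil => simp
  | cons hd tl ih =>
    simp only [List.foldl_cons, List.filter_cons, pvBInner, PySem.Str.isIn_eq]
    by_cases h : PySem.Chars.isIn (hd.2.head?.getD "").toList n.toList = true
    · simp [h, ih]
    · simp [h, ih]

-- filter/map through enumerate when the predicate and the map only look at the element
theorem pvEnum_filter_map (l : List (List String)) (s : Int)
    (pred : List String → Bool) (g : List String → List String) :
    ((PySem.List.enumerate l s).filter (fun ip => pred ip.2)).map (fun ip => g ip.2) =
      (l.filter pred).map g := by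
  induction l generalizing s with
  | nil => simp [PySem.List.enumerate_nil]
  | cons hd tl ih =>
    simp only [PySem.List.enumerate_cons, List.filter_cons]
    by_cases h : pred hd = true <;> simp [h, ih]

-- matched-set component of the inner fold: membership characterisation
theorem pvBInner_fst_mem (n : String) (l : List (Int × List String))
    (m : PySem.Set Int) (ps0 : List (List String)) (i : Int) :
    i ∈ (l.foldl (pvBInner n) (m, ps0)).1 ↔
      i ∈ m ∨ ∃ p, (i, p) ∈ l ∧ PySem.Str.isIn (p.headD "") n = true := by
  induction l generalizing m ps0 with
  | nil => simp
  | cons hd tl ih =>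
    simp only [List.foldl_cons, pvBInner, PySem.Str.isIn_eq]
    by_cases h : PySem.Chars.isIn (hd.2.headD "").toList n.toList = true
    · rw [if_pos h, ih]
      simp only [PySem.Set.mem_add, List.mem_cons, PySem.Str.isIn_eq]
      constructor
      · rintro ((hm | rfl) | ⟨p, hp, hq⟩)
        · exact Or.inl hm
        · exact Or.inr ⟨hd.2, Or.inl rfl, h⟩
        · exact Or.inr ⟨p, Or.inr hp, hq⟩
      · rintro (hm | ⟨p, he | hp, hq⟩)
        · exact Or.inl (Or.inl hm)
        · exact Or.inl (Or.inr (congrArg Prod.fst he))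
        · exact Or.inr ⟨p, hp, hq⟩
    · rw [if_neg h, ih]
      simp only [List.mem_cons, PySem.Str.isIn_eq]
      constructor
      · rintro (hm | ⟨p, hp, hq⟩)
        · exact Or.inl hm
        · exact Or.inr ⟨p, Or.inr hp, hq⟩
      · rintro (hm | ⟨p, he | hp, hq⟩)
        · exact Or.inl hm
        · exact absurd ((congrArg Prod.snd he) ▸ hq) h
        · exact Or.inr ⟨p, hp, hq⟩

-- matches component of B's outer fold = A's build loop (for any matched-set state)
theorem pvOuter_snd (patterns : List (List String)) (names : List String)
    (m : PySem.Set Int) (acc : List (String × List (List String))) :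
    (names.foldl (pvBStep patterns) (m, acc)).2 =
      names.foldl (fun out n =>
        let ps := (patterns.filter (fun p => PySem.Str.isIn (p.headD "") n)).map
          (fun p => PySem.List.slice p (some 1) none)
        if ps.length > 0 then out ++ [(n, ps)] else out) acc := by
  induction names generalizing m acc with
  | nil => simp
  | cons n tl ih =>
    simp only [List.foldl_cons]
    rw [show (pvBStep patterns (m, acc) n) =
      ((((PySem.List.enumerate patterns 0).foldl (pvBInner n) (m, [])).1),
        if ((PySem.List.enumerate patterns 0).foldl (pvBInner n) (m, [])).2 ≠ [] then
          acc ++ [(n, ((PySem.List.enumerate patterns 0).foldl (pvBInner n) (m, [])).2)]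
        else acc) from rfl]
    rw [ih]
    congr 1
    rw [pvBInner_snd, List.nil_append,
      pvEnum_filter_map patterns 0 (fun p => PySem.Str.isIn (p.headD "") n)
        (fun p => PySem.List.slice p (some 1) none)]
    by_cases h : ((patterns.filter (fun p => PySem.Str.isIn (p.headD "") n)).map
        (fun p => PySem.List.slice p (some 1) none)) = [] <;>
      simp [h]


-- matched-set component of B's outer fold: membership characterisation
theorem pvOuter_fst_mem (patterns : List (List String)) (names : List String)
    (m : PySem.Set Int) (acc : List (String × List (List String))) (i : Int) :
    i ∈ (names.foldl (pvBStep patterns) (m, acc)).1 ↔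
      i ∈ m ∨ ∃ n ∈ names, ∃ p, (i, p) ∈ PySem.List.enumerate patterns 0 ∧
        PySem.Str.isIn (p.headD "") n = true := by
  induction names generalizing m acc with
  | nil => simp
  | cons n tl ih =>
    simp only [List.foldl_cons]
    rw [show (pvBStep patterns (m, acc) n) =
      ((((PySem.List.enumerate patterns 0).foldl (pvBInner n) (m, [])).1),
        if ((PySem.List.enumerate patterns 0).foldl (pvBInner n) (m, [])).2 ≠ [] then
          acc ++ [(n, ((PySem.List.enumerate patterns 0).foldl (pvBInner n) (m, [])).2)]
        else acc) from rfl]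
    rw [ih, pvBInner_fst_mem]
    constructor
    · rintro ((hm | ⟨p, hp, hq⟩) | ⟨n', hn', p, hp, hq⟩)
      · exact Or.inl hm
      · exact Or.inr ⟨n, List.mem_cons_self .., p, hp, hq⟩
      · exact Or.inr ⟨n', List.mem_cons_of_mem _ hn', p, hp, hq⟩
    · rintro (hm | ⟨n', hn', p, hp, hq⟩)
      · exact Or.inl (Or.inl hm)
      · rcases List.mem_cons.mp hn' with rfl | hn'
        · exact Or.inl (Or.inr ⟨p, hp, hq⟩)
        · exact Or.inr ⟨n', hn', p, hp, hq⟩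

-- ===== VERDICT (by name: the statement is the Claim_ definition above) =====
theorem distribute_patterns_spec : Claim_equal_distribute_patterns := by
  intro names patterns _ hpre
  unfold Spec_distribute_patterns distribute_patterns distribute_patterns_alt
  by_cases hg : patterns = [] ∨ [] ∈ patterns
  · rw [if_pos hg, if_pos hg]
  · rcases hpre with h | h | h
    · exact absurd (Or.inl h) hg
    · exact absurd (Or.inr h) hg
    · have ha : patterns.all (fun p => names.any (fun n => PySem.Str.isIn (p.headD "") n)) = true := by
        rw [List.all_eq_true]
        intro p hp
        rcases h p hp with ⟨n, hn, hq⟩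
        rw [List.any_eq_true]
        exact ⟨n, hn, hq⟩
      have hb : (PySem.List.enumerate patterns 0).all
          (fun ip => PySem.Set.contains
            (names.foldl (pvBStep patterns) (PySem.Set.empty, [])).1 ip.1) = true := by
        rw [List.all_eq_true]
        intro ip hip
        have hsnd : ip.2 ∈ patterns := by
          rw [← PySem.List.map_snd_enumerate patterns 0]
          exact List.mem_map.mpr ⟨ip, hip, rfl⟩
        rcases h ip.2 hsnd with ⟨n, hn, hq⟩
        rw [PySem.Set.contains_iff, pvOuter_fst_mem]
        exact Or.inr ⟨n, hn, ip.2, hip, hq⟩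
      rw [if_neg hg, if_neg hg]
      show _ = if (PySem.List.enumerate patterns 0).all
          (fun ip => PySem.Set.contains
            (names.foldl (pvBStep patterns) (PySem.Set.empty, [])).1 ip.1) = true then
          (names.foldl (pvBStep patterns) (PySem.Set.empty, [])).2 else []
      rw [if_pos ha, if_pos hb]
      exact (pvOuter_snd patterns names PySem.Set.empty []).symm
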